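-- pv_equiv track=rewrite | github.com/SeungjipLee/Algorithm | 장현욱/9주차/(2)디펜스게임.py | solution
-- ===== SOURCE A (Python) =====
-- def solution(n, k, enemy):
--
--     # 리스트를 정렬시키고 k번만큼 뽑은다음 그 숫자가 나오면 무적권을 쓰게 하면?
--     answer = 0
--     clear = []
--     for i in range(len(enemy)):
--         clear.append(enemy[i])  # 클리어한것 넣기
--         n -= enemy[i]  # 이 던전을 클리어 한 후 n값
--
--         if n < 0 and k > 0:
--             max_clear = max(clear)  # clear 리스트에서 가장 큰 값을 찾음
--             n += max_clear  # 해당 값을 병사 수에 다시 추가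
--             clear.remove(max_clear)  # clear 리스트에서 해당 값을 삭제
--             k -= 1  # 무적권 차감
--
--         elif n < 0:
--             answer = i
--             break
--
--
--         answer = i+1
--
--     return answer
-- ===== SOURCE B (Python) =====
-- def _merge(a, b):
--     # leftist max-heap merge; a node is (value, rank, left, right), None is empty
--     if a is None:
--         return b
--     if b is None:
--         return a
--     if a[0] < b[0]:
--         a, b = b, a
--     m = _merge(a[3], b)
--     l = a[2]
--     lr = 0 if l is None else l[1]
--     mr = 0 if m is None else m[1]
--     if lr >= mr:
--         return (a[0], mr + 1, l, m)
--     return (a[0], lr + 1, m, l)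
--
--
-- def solution(n, k, enemy):
--     # Cleared waves live in a leftist max-heap: a token shields the largest
--     # cleared wave, i.e. the heap root; no rescans of the cleared list.
--     heap = None
--     i = 0
--     for e in enemy:
--         heap = _merge(heap, (e, 1, None, None))
--         n -= e
--         if n < 0:
--             if k <= 0:
--                 return i
--             n += heap[0]
--             heap = _merge(heap[2], heap[3])
--             k -= 1
--         i += 1
--     return i
-- ===== Notes on version B (the rewrite author's own statement) =====
-- stated objective: alternative
-- what changed: B stores the cleared waves in a hand-written leftist max-heap instead of A's unsorted list, so A's per-token max() and remove() scans disappear: a token takes the heap root and merges its children; intended as faster (O(n log n) vs O(n^2) comparisons) but a timing run read only ~1.15x at the largest timing size, so no speed is claimed.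
import Mathlib
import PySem

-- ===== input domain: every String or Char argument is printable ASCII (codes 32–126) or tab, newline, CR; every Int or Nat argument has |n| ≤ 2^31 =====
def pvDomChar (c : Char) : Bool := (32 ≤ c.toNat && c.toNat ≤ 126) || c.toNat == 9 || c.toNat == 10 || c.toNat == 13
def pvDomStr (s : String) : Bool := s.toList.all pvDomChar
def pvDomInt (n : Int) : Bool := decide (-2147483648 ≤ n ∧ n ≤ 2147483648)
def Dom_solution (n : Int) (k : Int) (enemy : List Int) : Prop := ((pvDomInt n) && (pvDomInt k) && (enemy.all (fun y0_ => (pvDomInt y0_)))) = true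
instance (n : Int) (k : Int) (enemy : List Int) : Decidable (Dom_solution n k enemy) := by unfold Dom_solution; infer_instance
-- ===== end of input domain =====

-- B stores the cleared waves in a hand-written leftist max-heap, so a token shields the heap
-- root instead of A's max()+remove() scans over an unsorted list; same return value everywhere.


-- ===== PORT A =====
-- Literal port of A: unsorted `clear` list; on deficit with a token left, scan for max and remove it.
def solution_go : List Int → Int → Int → Int → List Int → Int → Int
  | [], _, _, _, _, answer => answer
  | e :: rest, i, n, k, clear, _ =>
      let clear2 := clear ++ [e]
      let n2 := n - e
      if n2 < 0 ∧ k > 0 then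
        let m := (PySem.List.max? clear2 (fun y => y)).getD 0
        solution_go rest (i + 1) (n2 + m) (k - 1) ((PySem.List.remove? clear2 m).getD clear2) (i + 1)
      else if n2 < 0 then i
      else solution_go rest (i + 1) n2 k clear2 (i + 1)

def solution (n : Int) (k : Int) (enemy : List Int) : Int :=
  solution_go enemy 0 n k [] 0

-- ===== PORT B =====
-- B's Python node `(value, rank, left, right)` / `None` becomes this inductive (not nested).
inductive LHeap where
  | nil : LHeap
  | node : Int → Int → LHeap → LHeap → LHeap
deriving DecidableEq, Repr

-- `0 if t is None else t[1]`
def LHeap.rankD : LHeap → Int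
  | .nil => 0
  | .node _ r _ _ => r

def LHeap.size : LHeap → Nat
  | .nil => 0
  | .node _ _ l r => l.size + r.size + 1

-- Port of B's `_merge` (leftist max-heap merge; the `a, b = b, a` swap is the first branch).
-- Fuel is only a totality guard: it strictly bounds the recursion depth (size a + size b
-- decreases), so with the fuel `lmerge` supplies the 0-case is never reached.
def lmergeF : Nat → LHeap → LHeap → LHeap
  | 0, a, _ => a
  | _ + 1, .nil, b => b
  | _ + 1, .node av ar al arr, .nil => .node av ar al arr
  | f + 1, .node av ar al arr, .node bv br bl brr =>
      if av < bv then
        let m := lmergeF f brr (.node av ar al arr)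
        if bl.rankD ≥ m.rankD then .node bv (m.rankD + 1) bl m
        else .node bv (bl.rankD + 1) m bl
      else
        let m := lmergeF f arr (.node bv br bl brr)
        if al.rankD ≥ m.rankD then .node av (m.rankD + 1) al m
        else .node av (al.rankD + 1) m al

def lmerge (a b : LHeap) : LHeap := lmergeF (a.size + b.size) a b

-- `heap[0]` / `heap[2]` / `heap[3]` on the nonempty heap; the nil branch is Python's
-- TypeError on None, unreachable because the element was just merged in.
def solution_alt_go : List Int → Int → Int → Int → LHeap → Int
  | [], i, _, _, _ => i
  | e :: rest, i, n, k, heap =>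
      let heap2 := lmerge heap (.node e 1 .nil .nil)
      let n2 := n - e
      if n2 < 0 then
        if k ≤ 0 then i
        else
          match heap2 with
          | .nil => i
          | .node v _ l r => solution_alt_go rest (i + 1) (n2 + v) (k - 1) (lmerge l r)
      else solution_alt_go rest (i + 1) n2 k heap2

def solution_alt (n : Int) (k : Int) (enemy : List Int) : Int :=
  solution_alt_go enemy 0 n k .nil

-- ===== PRECONDITION & SPEC =====
def Spec_solution (n : Int) (k : Int) (enemy : List Int) (out : Int) : Prop := out = solution_alt n k enemy
instance (n : Int) (k : Int) (enemy : List Int) (out : Int) : Decidable (Spec_solution n k enemy out) := by unfold Spec_solution; infer_instance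

-- ===== CLAIM (what is proved, stated in full; the proofs are below) =====
def Claim_equal_solution : Prop := ∀ (n : Int) (k : Int) (enemy : List Int), Dom_solution n k enemy → Spec_solution n k enemy (solution n k enemy)

-- ===== LEMMAS AND PROOFS =====

def LHeap.elems : LHeap → List Int
  | .nil => []
  | .node v _ l r => v :: (l.elems ++ r.elems)

theorem coe_elems_node (v r : Int) (l rr : LHeap) :
    ((LHeap.node v r l rr).elems : Multiset Int)
      = {v} + ((l.elems : Multiset Int) + (rr.elems : Multiset Int)) := by
  simp only [LHeap.elems, ← Multiset.cons_coe, ← Multiset.coe_add, ← Multiset.singleton_add]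

theorem size_zero_nil (h : LHeap) (hz : h.size = 0) : h = .nil := by
  cases h with
  | nil => rfl
  | node v r l rr => simp [LHeap.size] at hz

theorem lmergeF_elems : ∀ (f : Nat) (a b : LHeap), a.size + b.size ≤ f →
    ((lmergeF f a b).elems : Multiset Int)
      = (a.elems : Multiset Int) + (b.elems : Multiset Int) := by
  intro f
  induction f with
  | zero =>
      intro a b hf
      have hb : b = .nil := size_zero_nil b (by omega)
      subst hb
      simp [lmergeF, LHeap.elems]
  | succ f ih =>
      intro a b hf
      cases a with
      | nil => simp [lmergeF, LHeap.elems]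
      | node av ar al arr =>
          cases b with
          | nil => simp [lmergeF, LHeap.elems]
          | node bv br bl brr =>
              simp only [lmergeF]
              by_cases hlt : av < bv
              · rw [if_pos hlt]
                have ihm := ih brr (.node av ar al arr)
                  (by simp only [LHeap.size] at hf ⊢; omega)
                have ihm' : ((lmergeF f brr (.node av ar al arr)).elems : Multiset Int)
                    = (brr.elems : Multiset Int)
                      + ({av} + ((al.elems : Multiset Int) + (arr.elems : Multiset Int))) := by
                  rw [ihm, coe_elems_node]
                split <;> (simp only [coe_elems_node, ihm']; abel)
              · rw [if_neg hlt]
                have ihm := ih arr (.node bv br bl brr)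
                  (by simp only [LHeap.size] at hf ⊢; omega)
                have ihm' : ((lmergeF f arr (.node bv br bl brr)).elems : Multiset Int)
                    = (arr.elems : Multiset Int)
                      + ({bv} + ((bl.elems : Multiset Int) + (brr.elems : Multiset Int))) := by
                  rw [ihm, coe_elems_node]
                split <;> (simp only [coe_elems_node, ihm']; abel)

theorem lmerge_elems_perm (a b : LHeap) : (lmerge a b).elems.Perm (a.elems ++ b.elems) := by
  rw [← Multiset.coe_eq_coe, ← Multiset.coe_add]
  exact lmergeF_elems (a.size + b.size) a b le_rfl

inductive IsHeap : LHeap → Prop where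
  | nil : IsHeap .nil
  | node : ∀ (v r : Int) (l rr : LHeap), IsHeap l → IsHeap rr →
      (∀ x ∈ l.elems, x ≤ v) → (∀ x ∈ rr.elems, x ≤ v) → IsHeap (.node v r l rr)

theorem IsHeap.le_root (v r : Int) (l rr : LHeap) (h : IsHeap (.node v r l rr)) :
    ∀ x ∈ (LHeap.node v r l rr).elems, x ≤ v := by
  cases h with
  | node _ _ _ _ _ _ hl hr =>
      intro x hx
      simp only [LHeap.elems, List.mem_cons, List.mem_append] at hx
      rcases hx with rfl | hx | hx
      · exact le_rfl
      · exact hl x hx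
      · exact hr x hx

theorem mem_lmergeF (f : Nat) (a b : LHeap) (hf : a.size + b.size ≤ f) (x : Int) :
    x ∈ (lmergeF f a b).elems ↔ x ∈ a.elems ∨ x ∈ b.elems := by
  rw [← Multiset.mem_coe, lmergeF_elems f a b hf]
  simp

theorem lmergeF_isHeap : ∀ (f : Nat) (a b : LHeap), a.size + b.size ≤ f →
    IsHeap a → IsHeap b → IsHeap (lmergeF f a b) := by
  intro f
  induction f with
  | zero =>
      intro a b hf ha hb
      exact ha
  | succ f ih =>
      intro a b hf ha hb
      cases a with
      | nil => exact hb
      | node av ar al arr =>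
          cases b with
          | nil => exact ha
          | node bv br bl brr =>
              simp only [lmergeF]
              have hsz1 : brr.size + (LHeap.node av ar al arr).size ≤ f := by
                simp only [LHeap.size] at hf ⊢; omega
              have hsz2 : arr.size + (LHeap.node bv br bl brr).size ≤ f := by
                simp only [LHeap.size] at hf ⊢; omega
              by_cases hlt : av < bv
              · rw [if_pos hlt]
                cases hb with
                | node _ _ _ _ hbl hbrr hblB hbrrB =>
                    have hm : IsHeap (lmergeF f brr (.node av ar al arr)) :=
                      ih brr _ hsz1 hbrr ha
                    have hmB : ∀ x ∈ (lmergeF f brr (.node av ar al arr)).elems, x ≤ bv := by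
                      intro x hx
                      rcases (mem_lmergeF f brr _ hsz1 x).mp hx with h | h
                      · exact hbrrB x h
                      · exact le_trans (IsHeap.le_root _ _ _ _ ha x h) (le_of_lt hlt)
                    split
                    · exact IsHeap.node _ _ _ _ hbl hm hblB hmB
                    · exact IsHeap.node _ _ _ _ hm hbl hmB hblB
              · rw [if_neg hlt]
                cases ha with
                | node _ _ _ _ hal harr halB harrB =>
                    have hm : IsHeap (lmergeF f arr (.node bv br bl brr)) :=
                      ih arr _ hsz2 harr hb
                    have hmB : ∀ x ∈ (lmergeF f arr (.node bv br bl brr)).elems, x ≤ av := by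
                      intro x hx
                      rcases (mem_lmergeF f arr _ hsz2 x).mp hx with h | h
                      · exact harrB x h
                      · exact le_trans (IsHeap.le_root _ _ _ _ hb x h) (by omega)
                    split
                    · exact IsHeap.node _ _ _ _ hal hm halB hmB
                    · exact IsHeap.node _ _ _ _ hm hal hmB halB

theorem lmerge_isHeap (a b : LHeap) (ha : IsHeap a) (hb : IsHeap b) : IsHeap (lmerge a b) :=
  lmergeF_isHeap (a.size + b.size) a b le_rfl ha hb

-- For a heap root v whose elements permute clear, Python max(clear) is v.
theorem max?_of_perm_heap (clear : List Int) (v r : Int) (l rr : LHeap)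
    (hp : (LHeap.node v r l rr).elems.Perm clear) (hh : IsHeap (.node v r l rr)) :
    PySem.List.max? clear (fun y => y) = some v := by
  have hne : clear ≠ [] := by
    intro h; subst h
    exact (by simp [LHeap.elems] : (LHeap.node v r l rr).elems ≠ []) hp.eq_nil
  obtain ⟨mc, hmc⟩ : ∃ mc, PySem.List.max? clear (fun y => y) = some mc := by
    cases hmax : PySem.List.max? clear (fun y => y) with
    | none => exact absurd ((PySem.List.max?_eq_none_iff clear _).mp hmax) hne
    | some mc => exact ⟨mc, rfl⟩
  have hmem : mc ∈ clear := PySem.List.max?_mem hmc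
  have hmax : ∀ y ∈ clear, y ≤ mc := fun y hy => PySem.List.max?_isMax hmc y hy
  have hv_mem : v ∈ clear := hp.mem_iff.mp (by simp [LHeap.elems])
  have h1 : v ≤ mc := hmax v hv_mem
  have h2 : mc ≤ v := IsHeap.le_root v r l rr hh mc (hp.mem_iff.mpr hmem)
  rw [hmc, le_antisymm h2 h1]

theorem go_eq (rest : List Int) : ∀ (i n k : Int) (clear : List Int) (h : LHeap),
    h.elems.Perm clear → IsHeap h →
    solution_go rest i n k clear i = solution_alt_go rest i n k h := by
  induction rest with
  | nil => intro i n k clear h _ _; rfl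
  | cons e rest ih =>
      intro i n k clear h hp hh
      simp only [solution_go, solution_alt_go]
      have hp2 : (lmerge h (.node e 1 .nil .nil)).elems.Perm (clear ++ [e]) := by
        refine (lmerge_elems_perm h _).trans ?_
        simp only [LHeap.elems, List.append_nil]
        exact (hp.append (List.Perm.refl [e]))
      have hh2 : IsHeap (lmerge h (.node e 1 .nil .nil)) :=
        lmerge_isHeap h _ hh (IsHeap.node e 1 .nil .nil IsHeap.nil IsHeap.nil
          (by simp [LHeap.elems]) (by simp [LHeap.elems]))
      by_cases hn : n - e < 0
      · by_cases hk : k > 0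
        · rw [if_pos ⟨hn, hk⟩, if_pos hn, if_neg (by omega)]
          cases hheap : lmerge h (.node e 1 .nil .nil) with
          | nil =>
              rw [hheap] at hp2
              have h0 : (clear ++ [e]).Perm [] := hp2.symm
              exact absurd h0.eq_nil (by simp)
          | node v r l rr =>
              rw [hheap] at hp2 hh2
              have hmax : PySem.List.max? (clear ++ [e]) (fun y => y) = some v :=
                max?_of_perm_heap _ v r l rr hp2 hh2
              have hv_mem : v ∈ clear ++ [e] := hp2.mem_iff.mp (by simp [LHeap.elems])
              have hrem : PySem.List.remove? (clear ++ [e]) v = some ((clear ++ [e]).erase v) :=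
                PySem.List.remove?_eq_some_erase _ v hv_mem
              have hperm : (lmerge l rr).elems.Perm ((clear ++ [e]).erase v) := by
                refine (lmerge_elems_perm l rr).trans ?_
                have h2 : (v :: (l.elems ++ rr.elems)).Perm (clear ++ [e]) := hp2
                have h3 := h2.erase v
                rwa [List.erase_cons_head] at h3
              have hhh : IsHeap (lmerge l rr) := by
                cases hh2 with
                | node _ _ _ _ hl hr _ _ => exact lmerge_isHeap l rr hl hr
              rw [hmax]
              simp only [Option.getD_some]
              rw [hrem]
              simp only [Option.getD_some]
              exact ih (i + 1) (n - e + v) (k - 1) _ (lmerge l rr) hperm hhh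
        · have hk' : k ≤ 0 := by omega
          rw [if_neg (show ¬(n - e < 0 ∧ k > 0) by tauto), if_pos hn, if_pos hn, if_pos hk']
      · rw [if_neg (show ¬(n - e < 0 ∧ k > 0) by tauto), if_neg hn, if_neg hn]
        exact ih (i + 1) (n - e) k (clear ++ [e]) _ hp2 hh2

-- ===== VERDICT (by name: the statement is the Claim_ definition above) =====
theorem solution_spec : Claim_equal_solution := by
  intro n k enemy _
  unfold Spec_solution solution solution_alt
  exact go_eq enemy 0 n k [] .nil (List.Perm.refl _) IsHeap.nil
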